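-- pv_equiv track=rewrite | github.com/unboxing96/ALGO | 프로그래머스/1/1845. 폰켓몬/폰켓몬.py | solution
-- ===== SOURCE A (Python) =====
-- def solution(nums):
--     cnt = 0
--     size = len(nums)
--     visited = [False] * (size + 1)
--     variety = len(set(nums))
--
--     if variety <= size // 2:
--         return variety
--
--     for i, num in enumerate(nums):
--         if not visited[i]:
--             visited[i] = True
--
--             if cnt + 1 <= size // 2:
--                 cnt += 1
--             else:
--                 break
--
--     return cnt
-- ===== SOURCE B (Python) =====
-- def solution(nums):
--     return min(len(set(nums)), len(nums) // 2)
-- ===== Notes on version B (the rewrite author's own statement) =====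
-- stated objective: simpler
-- what changed: Replaced the visited-array counting loop and early-return branch with the closed form min(len(set(nums)), len(nums)//2).
import Mathlib
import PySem

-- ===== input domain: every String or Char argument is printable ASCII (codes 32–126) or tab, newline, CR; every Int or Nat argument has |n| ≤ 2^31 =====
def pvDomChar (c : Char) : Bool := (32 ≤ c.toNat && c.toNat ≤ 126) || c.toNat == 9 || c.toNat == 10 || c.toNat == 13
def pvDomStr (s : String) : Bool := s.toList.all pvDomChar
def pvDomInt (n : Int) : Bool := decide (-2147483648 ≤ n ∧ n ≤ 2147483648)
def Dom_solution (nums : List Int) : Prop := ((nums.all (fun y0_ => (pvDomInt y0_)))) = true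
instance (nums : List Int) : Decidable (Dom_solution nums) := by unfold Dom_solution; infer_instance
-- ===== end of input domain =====

-- B replaces A's visited-array counting loop with the closed form min(len(set nums), len(nums)//2); objective: simpler.


-- ===== PORT A =====
-- the 'for i, num in enumerate(nums)' loop; break returns cnt.
-- visited[i] is ported with pyGetD (exact here: every index i from enumerate satisfies 0 ≤ i < size+1 = visited.length)
def solLoop (cap : Int) : List (Int × Int) → List Bool → Int → Int
  | [], _, cnt => cnt
  | (i, _) :: rest, visited, cnt =>
    if !(PySem.List.pyGetD visited i false) then
      let visited' := visited.set i.toNat true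
      if cnt + 1 ≤ cap then solLoop cap rest visited' (cnt + 1)
      else cnt
    else solLoop cap rest visited cnt

def solution (nums : List Int) : Int :=
  let size : Int := nums.length
  let visited : List Bool := List.replicate (size.toNat + 1) false
  let variety : Int := PySem.Set.len (PySem.Set.ofList nums)
  if variety ≤ PySem.Int.floordiv size 2 then variety
  else solLoop (PySem.Int.floordiv size 2) (PySem.List.enumerate nums) visited 0

-- ===== PORT B =====
def solution_alt (nums : List Int) : Int :=
  min (PySem.Set.len (PySem.Set.ofList nums)) (PySem.Int.floordiv (nums.length : Int) 2)

-- ===== PRECONDITION & SPEC =====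
def Spec_solution (nums : List Int) (out : Int) : Prop := out = solution_alt nums
instance (nums : List Int) (out : Int) : Decidable (Spec_solution nums out) := by unfold Spec_solution; infer_instance

-- ===== CLAIM (what is proved, stated in full; the proofs are below) =====
def Claim_equal_solution : Prop := ∀ (nums : List Int), Dom_solution nums → Spec_solution nums (solution nums)

-- ===== LEMMAS AND PROOFS =====

-- set(xs) has at most as many elements as xs (accumulator-generalised)
theorem len_foldl_add_le {α : Type} [DecidableEq α] (xs : List α) (s : PySem.Set α) :
    (xs.foldl PySem.Set.add s).length ≤ s.length + xs.length := by
  induction xs generalizing s with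
  | nil => simp
  | cons x xs ih =>
    have h := ih (PySem.Set.add s x)
    have hadd : (PySem.Set.add s x).length ≤ s.length + 1 := by
      simp [PySem.Set.add]; split <;> simp
    simp only [List.foldl_cons, List.length_cons]
    omega

theorem len_ofList_le {α : Type} [DecidableEq α] (xs : List α) :
    (PySem.Set.ofList xs).length ≤ xs.length := by
  have := len_foldl_add_le xs ([] : PySem.Set α)
  simpa [PySem.Set.ofList_eq_foldl] using this

-- the loop over enumerate l (start k), with visited false at every index ≥ k, computes min (cnt + |l|) cap
theorem solLoop_spec (cap : Int) (l : List Int) :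
    ∀ (k : Nat) (visited : List Bool) (cnt : Int), cnt ≤ cap →
    (∀ j : Nat, k ≤ j → visited.getD j false = false) →
    solLoop cap (PySem.List.enumerate l (k : Int)) visited cnt = min (cnt + l.length) cap := by
  induction l with
  | nil =>
    intro k visited cnt hle _
    simp [PySem.List.enumerate_nil, solLoop]
    omega
  | cons x l ih =>
    intro k visited cnt hle hvis
    rw [PySem.List.enumerate_cons]
    have hget : PySem.List.pyGetD visited (k : Int) false = false := by
      rw [PySem.List.pyGetD_natCast]
      exact hvis k le_rfl
    simp only [solLoop, hget, Bool.not_false, if_true]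
    by_cases hc : cnt + 1 ≤ cap
    · rw [if_pos hc]
      have hk1 : ((k : Int) + 1) = ((k + 1 : Nat) : Int) := by push_cast; ring
      have hset : ∀ j : Nat, k + 1 ≤ j →
          ((visited.set (Int.toNat (k : Int)) true).getD j false) = false := by
        intro j hj
        have hne : (Int.toNat (k : Int)) ≠ j := by omega
        rw [List.getD, List.getElem?_set_ne hne]
        exact hvis j (by omega)
      have := ih (k + 1) (visited.set (Int.toNat (k : Int)) true) (cnt + 1) hc hset
      rw [hk1, this]
      simp only [List.length_cons]
      omega
    · rw [if_neg hc]
      simp only [List.length_cons]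
      omega

theorem solution_eq (nums : List Int) : solution nums = solution_alt nums := by
  unfold solution solution_alt
  set variety : Int := PySem.Set.len (PySem.Set.ofList nums) with hv
  have hcap : PySem.Int.floordiv (nums.length : Int) 2 = ((nums.length / 2 : Nat) : Int) := by
    exact_mod_cast PySem.Int.floordiv_natCast nums.length 2
  by_cases h : variety ≤ PySem.Int.floordiv (nums.length : Int) 2
  · simp only [if_pos h]
    omega
  · simp only [if_neg h]
    have hloop := solLoop_spec (PySem.Int.floordiv (nums.length : Int) 2) nums 0
      (List.replicate (Int.toNat (nums.length : Int) + 1) false) 0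
      (by rw [hcap]; positivity)
      (by intro j _; simp [List.getD])
    rw [Nat.cast_zero] at hloop
    rw [hloop]
    have hvle : variety ≤ (nums.length : Int) := by
      have h1 := len_ofList_le nums
      simp only [hv, PySem.Set.len]
      exact_mod_cast h1
    have : ((nums.length / 2 : Nat) : Int) ≤ (nums.length : Int) := by
      have : nums.length / 2 ≤ nums.length := Nat.div_le_self _ _
      exact_mod_cast this
    omega

-- ===== VERDICT (by name: the statement is the Claim_ definition above) =====
theorem solution_spec : Claim_equal_solution := by
  intro nums _
  unfold Spec_solution
  exact solution_eq nums
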